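-- pv_equiv track=rewrite | github.com/mplp/docassemble-mlhframework | docassemble/mlhframework/MLH_functions.py | strip_end_punctuation
-- ===== SOURCE A (Python) =====
-- def strip_end_punctuation(text, punctuation_marks=None):
--     """Removes any punctuation marks from the end of the text."""
--     if text is None or not isinstance(text, str):
--         return text
--
--     if punctuation_marks is None:
--         punctuation_marks = ['.', ',', '?', '!', ':', ';']
--
--     if not isinstance(punctuation_marks, list):
--         punctuation_marks = list(punctuation_marks)
--
--     text = text.rstrip()
--
--     while text and any(text.endswith(mark) for mark in punctuation_marks):
--         for mark in punctuation_marks: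
--             if text.endswith(mark):
--                 text = text[:-len(mark)]
--                 text = text.rstrip()
--                 break
--
--     return text
-- ===== SOURCE B (Python) =====
-- def strip_end_punctuation(text, punctuation_marks=None):
--     """Removes any punctuation marks from the end of the text."""
--     if text is None or not isinstance(text, str):
--         return text
--
--     if punctuation_marks is None:
--         punctuation_marks = ['.', ',', '?', '!', ':', ';']
--
--     if not isinstance(punctuation_marks, list):
--         punctuation_marks = list(punctuation_marks)
--
--     i = len(text)
--     while True:
--         while i > 0 and text[i - 1].isspace():
--             i -= 1
--         for mark in punctuation_marks:
--             if mark and text.endswith(mark, 0, i):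
--                 i -= len(mark)
--                 break
--         else:
--             return text[:i]
-- ===== Notes on version B (the rewrite author's own statement) =====
-- stated objective: alternative
-- what changed: A repeatedly slices and rstrips the string, copying the whole remainder on every removal; B keeps the text intact and moves a single backward boundary index over it, skipping whitespace and matched marks, and slices once at the end.
-- intended difference: If punctuation_marks contains the empty string, A's slice text[:-0] wipes the whole remaining text and A returns an empty result, an artefact of negative-length slicing; B treats an empty mark as a no-op and returns the normally stripped text, which is the intended behaviour. — e.g. on strip_end_punctuation("ab", some [""]): A returns "", B returns "ab"
import Mathlib
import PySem

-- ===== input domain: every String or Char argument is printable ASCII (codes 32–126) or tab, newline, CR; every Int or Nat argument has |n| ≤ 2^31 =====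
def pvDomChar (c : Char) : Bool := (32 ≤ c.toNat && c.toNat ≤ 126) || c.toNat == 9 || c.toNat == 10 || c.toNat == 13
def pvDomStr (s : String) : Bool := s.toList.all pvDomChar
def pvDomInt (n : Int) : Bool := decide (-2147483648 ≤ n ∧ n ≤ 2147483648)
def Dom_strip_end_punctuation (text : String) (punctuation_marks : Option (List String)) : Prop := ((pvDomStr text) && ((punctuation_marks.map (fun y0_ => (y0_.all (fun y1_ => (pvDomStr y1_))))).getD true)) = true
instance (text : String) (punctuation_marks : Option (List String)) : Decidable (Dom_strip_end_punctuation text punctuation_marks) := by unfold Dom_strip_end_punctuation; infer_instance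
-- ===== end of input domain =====

-- B replaces A's repeated slice-and-rstrip loop (each removal copies the whole remaining
-- string) by a single backward boundary scan over the unchanged text, slicing once at the end.

-- ===== PORT A =====
-- A's while loop; the fuel (text length + 1) is only a totality bound: every iteration
-- strictly shortens s (a matched mark removes at least its last character, text[:-0] = '').
def pvALoop (marks : List (List Char)) : Nat → List Char → List Char
  | 0, s => s
  | fuel+1, s =>
    if !s.isEmpty && marks.any (fun m => PySem.Chars.endswith s m) then
      match marks.find? (fun m => PySem.Chars.endswith s m) with
      | some m =>
          -- text = text[:-len(mark)]; text = text.rstrip()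
          pvALoop marks fuel (PySem.Chars.rstrip (PySem.Chars.slice s none (some (-(m.length : Int)))))
      | none => s
    else s

def strip_end_punctuation (text : String) (punctuation_marks : Option (List String)) : String :=
  let marks := (punctuation_marks.getD [".", ",", "?", "!", ":", ";"]).map String.toList
  String.ofList (pvALoop marks (text.toList.length + 1) (PySem.Chars.rstrip text.toList))

-- ===== PORT B =====
-- inner `while i > 0 and text[i-1].isspace(): i -= 1` (the getD default is never read: i ≤ len text)
def pvSkipWs (cs : List Char) : Nat → Nat
  | 0 => 0
  | i+1 => if PySem.Chars.isspace (cs.getD i ' ') then pvSkipWs cs i else i+1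

-- outer `while True` of B; fuel (len + 1) is a totality bound (i strictly decreases)
def pvBLoop (cs : List Char) (marks : List (List Char)) : Nat → Nat → Nat
  | 0, i => i
  | fuel+1, i =>
    let j := pvSkipWs cs i
    -- `text.endswith(mark, 0, i)` is exactly endswith on the prefix of length i
    match marks.find? (fun m => !m.isEmpty && PySem.Chars.endswith (cs.take j) m) with
    | some m => pvBLoop cs marks fuel (j - m.length)
    | none => j

def strip_end_punctuation_alt (text : String) (punctuation_marks : Option (List String)) : String :=
  let cs := text.toList
  let marks := (punctuation_marks.getD [".", ",", "?", "!", ":", ";"]).map String.toList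
  String.ofList (cs.take (pvBLoop cs marks (cs.length + 1) cs.length))

-- ===== PRECONDITION & SPEC =====
-- If some punctuation mark is the empty string, A's slice text[:-0] silently wipes the whole
-- remaining text and A returns an empty result, an artefact of negative-length slicing; B
-- ignores empty marks (removing an empty suffix is a no-op) and returns the stripped text.
def D_strip_end_punctuation (text : String) (punctuation_marks : Option (List String)) : Prop :=
  "" ∈ punctuation_marks.getD []
instance (text : String) (punctuation_marks : Option (List String)) : Decidable (D_strip_end_punctuation text punctuation_marks) := by unfold D_strip_end_punctuation; infer_instance

def Spec_strip_end_punctuation (text : String) (punctuation_marks : Option (List String)) (out : String) : Prop := ¬ D_strip_end_punctuation text punctuation_marks → out = strip_end_punctuation_alt text punctuation_marks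
instance (text : String) (punctuation_marks : Option (List String)) (out : String) : Decidable (Spec_strip_end_punctuation text punctuation_marks out) := by unfold Spec_strip_end_punctuation; infer_instance

def pvDiffWitness_strip_end_punctuation : String × Option (List String) := ("ab", some [""])
def pvDiffWitnessOut_strip_end_punctuation : String × String := ("", "ab")

-- ===== CLAIM (what is proved, stated in full; the proofs are below) =====
def Claim_unchanged_strip_end_punctuation : Prop := ∀ (text : String) (punctuation_marks : Option (List String)), Dom_strip_end_punctuation text punctuation_marks → Spec_strip_end_punctuation text punctuation_marks (strip_end_punctuation text punctuation_marks)
def Claim_changed_strip_end_punctuation : Prop := Dom_strip_end_punctuation (pvDiffWitness_strip_end_punctuation.1) (pvDiffWitness_strip_end_punctuation.2) ∧ D_strip_end_punctuation (pvDiffWitness_strip_end_punctuation.1) (pvDiffWitness_strip_end_punctuation.2) ∧ strip_end_punctuation (pvDiffWitness_strip_end_punctuation.1) (pvDiffWitness_strip_end_punctuation.2) = pvDiffWitnessOut_strip_end_punctuation.1 ∧ strip_end_punctuation_alt (pvDiffWitness_strip_end_punctuation.1) (pvDiffWitness_strip_end_punctuation.2) = pvDiffWitnessOut_strip_end_punctuation.2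 ∧ pvDiffWitnessOut_strip_end_punctuation.1 ≠ pvDiffWitnessOut_strip_end_punctuation.2

-- ===== LEMMAS AND PROOFS =====

theorem pvFind?_congr {α : Type} (p q : α → Bool) (l : List α) (h : ∀ a ∈ l, p a = q a) :
    l.find? p = l.find? q := by
  induction l with
  | nil => rfl
  | cons x xs ih =>
    simp only [List.find?]
    rw [h x (by simp)]
    cases q x <;> simp [ih (fun a ha => h a (List.mem_cons_of_mem _ ha))]

theorem pvSkipWs_le (cs : List Char) (i : Nat) : pvSkipWs cs i ≤ i := by
  induction i with
  | zero => simp [pvSkipWs]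
  | succ n ih => simp only [pvSkipWs]; split <;> omega

theorem pvSkipWs_rstrip (cs : List Char) (i : Nat) (h : i ≤ cs.length) :
    PySem.Chars.rstrip (cs.take i) = cs.take (pvSkipWs cs i) := by
  induction i with
  | zero => simp [pvSkipWs, PySem.Chars.rstrip]
  | succ n ih =>
    have hn : n < cs.length := by omega
    have htake : cs.take (n+1) = cs.take n ++ [cs.getD n ' '] := by
      rw [List.take_add_one]
      simp [List.getElem?_eq_getElem hn, List.getD]
    simp only [pvSkipWs]
    split
    · next hsp =>
      rw [htake, ← ih (by omega)]
      simp only [List.getD] at hsp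
      simp [PySem.Chars.rstrip, hsp]
    · next hsp =>
      rw [htake]
      simp only [List.getD] at hsp
      simp [PySem.Chars.rstrip, hsp]

theorem pvSlice_neg (s : List Char) (k : Nat) (hk0 : 0 < k) (hk : k ≤ s.length) :
    PySem.Chars.slice s none (some (-(k : Int))) = s.take (s.length - k) := by
  simp only [PySem.Chars.slice_eq_listSlice, PySem.List.slice, PySem.List.clampIdx]
  have h2 : (-(k : Int) < 0) := by omega
  have h3 : ¬ ((s.length : Int) + (-(k : Int)) < 0) := by omega
  simp only [h2, if_true, h3, if_false]
  congr 1
  omega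

theorem pvEndswith_le (s m : List Char) (h : PySem.Chars.endswith s m = true) :
    m.length ≤ s.length := by
  rw [PySem.Chars.endswith_iff] at h; exact h.length_le

-- main loop correspondence, outside D_
theorem pvLoop_eq (cs : List Char) (marks : List (List Char))
    (hm : ∀ m ∈ marks, m ≠ []) :
    ∀ fuel i, i < fuel → i ≤ cs.length →
      pvALoop marks fuel (PySem.Chars.rstrip (cs.take i)) = cs.take (pvBLoop cs marks fuel i) := by
  intro fuel
  induction fuel with
  | zero => intro i h; omega
  | succ fuel ih =>
    intro i hif hil
    have hji : pvSkipWs cs i ≤ i := pvSkipWs_le cs i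
    have hrs : PySem.Chars.rstrip (cs.take i) = cs.take (pvSkipWs cs i) := pvSkipWs_rstrip cs i hil
    rw [hrs]
    set j := pvSkipWs cs i with hj
    have hfind : marks.find? (fun m => !m.isEmpty && PySem.Chars.endswith (cs.take j) m)
        = marks.find? (fun m => PySem.Chars.endswith (cs.take j) m) := by
      apply pvFind?_congr
      intro m hmem
      have hne := hm m hmem
      simp [hne]
    simp only [pvALoop, pvBLoop, ← hj, hfind]
    cases hfd : marks.find? (fun m => PySem.Chars.endswith (cs.take j) m) with
    | none =>
      have hany : marks.any (fun m => PySem.Chars.endswith (cs.take j) m) = false := by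
        rw [List.any_eq_false]
        intro m hmem
        simpa using List.find?_eq_none.mp hfd m hmem
      simp [hany]
    | some m =>
      have hmem : m ∈ marks := List.mem_of_find?_eq_some hfd
      have hesw : PySem.Chars.endswith (cs.take j) m = true := by
        simpa using List.find?_some hfd
      have hml : 1 ≤ m.length := by
        have := hm m hmem
        cases m with
        | nil => simp at this
        | cons a l => simp
      have hlen : (cs.take j).length = j := by
        rw [List.length_take]; omega
      have hmj : m.length ≤ j := by
        have := pvEndswith_le _ _ hesw; omega
      have hguard : (!(cs.take j).isEmpty && marks.any (fun m => PySem.Chars.endswith (cs.take j) m)) = true := by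
        have h1 : (cs.take j).isEmpty = false := by
          rw [List.isEmpty_eq_false_iff, ← List.length_pos_iff]; omega
        have h2 : marks.any (fun m => PySem.Chars.endswith (cs.take j) m) = true :=
          List.any_eq_true.mpr ⟨m, hmem, hesw⟩
        rw [h1, h2]; rfl
      have hslice : PySem.Chars.slice (cs.take j) none (some (-(m.length : Int)))
          = cs.take (j - m.length) := by
        rw [pvSlice_neg _ _ hml (by omega), hlen, List.take_take]
        congr 1
        omega
      rw [hguard]
      simp only [if_true, hslice]
      exact ih (j - m.length) (by omega) (by omega)

-- ===== VERDICT (by name: the statement is the Claim_ definition above) =====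
theorem strip_end_punctuation_spec : Claim_unchanged_strip_end_punctuation := by
  intro text punctuation_marks _
  unfold Spec_strip_end_punctuation
  intro hD
  unfold strip_end_punctuation strip_end_punctuation_alt
  have hm : ∀ m ∈ (punctuation_marks.getD [".", ",", "?", "!", ":", ";"]).map String.toList, m ≠ [] := by
    cases punctuation_marks with
    | none => decide
    | some ms =>
      intro m hmem
      simp only [Option.getD_some, List.mem_map] at hmem
      obtain ⟨s, hs, rfl⟩ := hmem
      intro hnil
      exact hD (by simpa [D_strip_end_punctuation, String.toList_eq_nil_iff.mp hnil] using hs)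
  have h := pvLoop_eq text.toList ((punctuation_marks.getD [".", ",", "?", "!", ":", ";"]).map String.toList)
    hm (text.toList.length + 1) text.toList.length (by omega) (le_refl _)
  rw [List.take_length] at h
  simp only [h]

theorem strip_end_punctuation_changed : Claim_changed_strip_end_punctuation := by
  unfold Claim_changed_strip_end_punctuation; decide
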